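-- pv_equiv track=rewrite | github.com/fanfancy/hetero_gem5 | nnparser_MLF_hetero/multi_network_DSE.py | decodeCode
-- ===== SOURCE A (Python) =====
-- def decodeCode(code):
-- 	sp_max_dict = {}
-- 	for w_name, sp_tp_id in code.items():
-- 		sp_id = sp_tp_id[1]
-- 		tp_id = sp_tp_id[0]
-- 		if tp_id not in sp_max_dict:
-- 			sp_max_dict[tp_id] = 0
-- 		if sp_id > sp_max_dict[tp_id]:
-- 			sp_max_dict[tp_id] = sp_id
--
-- 	tp_sp_space = {}
-- 	for tp_id in range(len(sp_max_dict)):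
-- 		tp_sp_space[tp_id] = {}
-- 		sp_max = sp_max_dict[tp_id]
-- 		for sp_id in range(sp_max+1):
-- 			tp_sp_space[tp_id][sp_id] = []
--
-- 	for w_name, sp_tp_id in code.items():
-- 		sp_id = sp_tp_id[1]
-- 		tp_id = sp_tp_id[0]
-- 		#if tp_id not in tp_sp_space:
-- 		#	tp_sp_space[tp_id] = {}
-- 		#if sp_id not in tp_sp_space[tp_id]:
-- 		#	tp_sp_space[tp_id][sp_id] = []
-- 		tp_sp_space[tp_id][sp_id].append(w_name)
-- 	return tp_sp_space
-- ===== SOURCE B (Python) =====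
-- def decodeCode(code):
-- 	by_tp = {}
-- 	for w_name, sp_tp_id in code.items():
-- 		by_tp.setdefault(sp_tp_id[0], []).append((sp_tp_id[1], w_name))
-- 	tp_sp_space = {}
-- 	for tp in range(len(by_tp)):
-- 		rows = by_tp[tp]
-- 		sp_max = max((sp for sp, _ in rows), default=0)
-- 		tp_sp_space[tp] = {sp: [w for s, w in rows if s == sp] for sp in range(sp_max + 1)}
-- 	return tp_sp_space
-- ===== Notes on version B (the rewrite author's own statement) =====
-- stated objective: alternative
-- what changed: A maintains a separate running-max dict, pre-fills the whole nested output, and then mutates it in a third append pass; B groups each tp's (sp, name) rows into a flat list in one pass and then builds every inner dict directly from that group by per-sp filter comprehensions (no pre-fill, no shared mutable nested structure).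
import Mathlib
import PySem

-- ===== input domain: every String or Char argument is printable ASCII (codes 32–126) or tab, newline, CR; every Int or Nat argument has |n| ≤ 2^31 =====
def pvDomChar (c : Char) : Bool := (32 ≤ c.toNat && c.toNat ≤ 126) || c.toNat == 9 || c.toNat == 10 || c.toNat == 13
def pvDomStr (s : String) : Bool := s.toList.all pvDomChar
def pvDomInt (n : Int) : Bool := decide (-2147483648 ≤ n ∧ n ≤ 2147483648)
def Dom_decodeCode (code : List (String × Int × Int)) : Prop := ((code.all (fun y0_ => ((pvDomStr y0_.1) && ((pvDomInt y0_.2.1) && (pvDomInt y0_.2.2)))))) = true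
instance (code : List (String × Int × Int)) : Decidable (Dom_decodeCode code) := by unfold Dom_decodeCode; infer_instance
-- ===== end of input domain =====

-- B replaces A's running-max dict, global pre-fill and shared-structure append passes by one
-- flat per-tp row-grouping pass plus per-group construction of each inner dict with filter
-- comprehensions (alternative decomposition, same return value).

-- ===== PORT A =====
-- three passes, as in A: sp_max_dict; pre-fill per tp; append each name.  Where the Python
-- raises KeyError (a non-contiguous tp id, a negative sp id) the port's getD/modify defaults
-- apply instead — those inputs are outside Pre_decodeCode.
def decodeCode (code : List (String × Int × Int)) : List (Int × List (Int × List String)) :=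
  let spMax : PySem.Dict Int Int :=
    code.foldl (fun d e =>
      let d1 := if d.contains e.2.1 then d else d.insert e.2.1 0
      if e.2.2 > d1.getD e.2.1 0 then d1.insert e.2.1 e.2.2 else d1) PySem.Dict.empty
  let space0 : PySem.Dict Int (PySem.Dict Int (List String)) :=
    (PySem.List.pyRange 0 (spMax.size : Int)).foldl (fun t tp =>
      t.insert tp ((PySem.List.pyRange 0 (spMax.getD tp 0 + 1)).foldl
        (fun (inner : PySem.Dict Int (List String)) sp => inner.insert sp []) PySem.Dict.empty)) PySem.Dict.empty
  let space1 : PySem.Dict Int (PySem.Dict Int (List String)) :=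
    code.foldl (fun t e =>
      t.modify e.2.1 PySem.Dict.empty (fun inner => inner.modify e.2.2 [] (fun l => l ++ [e.1]))) space0
  space1.items.map (fun p => (p.1, p.2.items))

-- ===== PORT B =====
-- one grouping pass collecting each tp's (sp, name) rows into a flat list, then for each tp id
-- in range: its rows (by_tp[tp]; where the Python raises KeyError the getD default applies —
-- outside Pre_decodeCode), their max sp, and the inner dict built by per-sp filters.
def decodeCode_alt (code : List (String × Int × Int)) : List (Int × List (Int × List String)) :=
  let byTp : PySem.Dict Int (List (Int × String)) :=
    code.foldl (fun g e =>
      g.insert e.2.1 (g.getD e.2.1 [] ++ [(e.2.2, e.1)])) PySem.Dict.empty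
  (PySem.List.pyRange 0 (byTp.size : Int)).map (fun tp =>
    let rows : List (Int × String) := byTp.getD tp []
    let spMax : Int := PySem.List.maxD (rows.map (fun r => r.1)) (fun x => x) 0
    (tp, (PySem.List.pyRange 0 (spMax + 1)).map (fun sp =>
      (sp, (rows.filter (fun r => r.1 == sp)).map (fun r => r.2)))))

-- ===== PRECONDITION & SPEC =====
-- Exactly the inputs on which the Python A returns normally: every sp id is ≥ 0 and every
-- tp id lies in [0, k) where k is the number of distinct tp ids (so the tp ids are exactly
-- 0 … k-1); on any other well-typed input A raises KeyError.
def Pre_decodeCode (code : List (String × Int × Int)) : Prop :=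
  ∀ e ∈ code, 0 ≤ e.2.2 ∧ 0 ≤ e.2.1 ∧
    e.2.1 < ((PySem.Set.ofList (code.map (fun x => x.2.1))).length : Int)
instance (code : List (String × Int × Int)) : Decidable (Pre_decodeCode code) := by
  unfold Pre_decodeCode; infer_instance
def pvWitness_decodeCode : (List (String × Int × Int)) :=
  [("a", 0, 1), ("b", 1, 0), ("c", 0, 0)]
def Spec_decodeCode (code : List (String × Int × Int)) (out : List (Int × List (Int × List String))) : Prop := out = decodeCode_alt code
instance (code : List (String × Int × Int)) (out : List (Int × List (Int × List String))) : Decidable (Spec_decodeCode code out) := by unfold Spec_decodeCode; infer_instance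

-- ===== CLAIM (what is proved, stated in full; the proofs are below) =====
def Claim_equal_decodeCode : Prop := ∀ (code : List (String × Int × Int)), Dom_decodeCode code → Pre_decodeCode code → Spec_decodeCode code (decodeCode code)

-- ===== LEMMAS AND PROOFS =====

theorem pv_spMax_getD (code : List (String × Int × Int)) (t : PySem.Dict Int Int) (c : Int) :
    (code.foldl (fun d e =>
      let d1 := if d.contains e.2.1 then d else d.insert e.2.1 0
      if e.2.2 > d1.getD e.2.1 0 then d1.insert e.2.1 e.2.2 else d1) t).getD c 0
    = code.foldl (fun m e => if e.2.1 = c then (if m < e.2.2 then e.2.2 else m) else m) (t.getD c 0) := by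
  induction code generalizing t with
  | nil => rfl
  | cons e rest ih =>
    simp only [List.foldl_cons, ih]
    congr 1
    by_cases hc : e.2.1 = c
    · subst hc
      by_cases hcont : t.contains e.2.1
      · by_cases hlt : t.getD e.2.1 0 < e.2.2 <;>
          simp [hcont, hlt, PySem.Dict.getD_insert_self, gt_iff_lt]
      · have hg : t.getD e.2.1 0 = 0 :=
          PySem.Dict.getD_of_not_contains _ _ (by simpa using hcont)
        by_cases hlt : (0:Int) < e.2.2 <;>
          simp [hcont, hg, hlt, PySem.Dict.getD_insert_self, gt_iff_lt]
    · have hne : c ≠ e.2.1 := fun hh => hc hh.symm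
      by_cases hcont : t.contains e.2.1
      · by_cases hlt : t.getD e.2.1 0 < e.2.2 <;>
          simp [hcont, hlt, PySem.Dict.getD_insert, hne, gt_iff_lt, hc]
      · have hg : (t.insert e.2.1 0).getD e.2.1 0 = 0 := by
          simp [PySem.Dict.getD_insert_self]
        by_cases hlt : (0:Int) < e.2.2 <;>
          simp [hcont, hg, hlt, PySem.Dict.getD_insert, hne, gt_iff_lt, hc]

theorem pv_spMax_keys (code : List (String × Int × Int)) (t : PySem.Dict Int Int) :
    (code.foldl (fun d e =>
      let d1 := if d.contains e.2.1 then d else d.insert e.2.1 0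
      if e.2.2 > d1.getD e.2.1 0 then d1.insert e.2.1 e.2.2 else d1) t).keys
    = PySem.Set.update t.keys (code.map (fun x => x.2.1)) := by
  induction code generalizing t with
  | nil => rfl
  | cons e rest ih =>
    simp only [List.foldl_cons, List.map_cons, PySem.Set.update_cons, ih]
    have hkeys : ∀ t1 : PySem.Dict Int Int, t1.keys = PySem.Set.add t.keys e.2.1 →
        PySem.Set.update ((if e.2.2 > t1.getD e.2.1 0 then t1.insert e.2.1 e.2.2 else t1).keys)
          (rest.map (fun x => x.2.1))
        = PySem.Set.update ((PySem.Set.add t.keys e.2.1 : PySem.Set Int))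
          (rest.map (fun x => x.2.1)) := by
      intro t1 h1
      have hc1 : t1.contains e.2.1 = true := by
        rw [PySem.Dict.contains_eq_decide_mem_keys, h1, decide_eq_true_iff]
        exact (PySem.Set.mem_add _ _ _).2 (Or.inr rfl)
      by_cases hlt : e.2.2 > t1.getD e.2.1 0
      · rw [if_pos hlt, PySem.Dict.keys_insert_of_contains _ _ hc1, h1]
      · rw [if_neg hlt, h1]
    by_cases hcont : t.contains e.2.1
    · simp only [hcont, if_true]
      exact hkeys t (by
        rw [PySem.Set.add_eq_ite, if_pos]
        rw [PySem.Dict.contains_eq_decide_mem_keys, decide_eq_true_iff] at hcont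
        exact hcont)
    · simp only [hcont, if_false, Bool.false_eq_true]
      exact hkeys (t.insert e.2.1 0) (by
        rw [PySem.Dict.keys_insert_of_not_contains _ _ (by simpa using hcont),
          PySem.Set.add_eq_ite, if_neg]
        rw [PySem.Dict.contains_eq_decide_mem_keys] at hcont
        simpa using hcont)

theorem pv_M_init_le (code : List (String × Int × Int)) (c : Int) (m0 : Int) :
    m0 ≤ code.foldl (fun m e => if e.2.1 = c then (if m < e.2.2 then e.2.2 else m) else m) m0 := by
  induction code generalizing m0 with
  | nil => simp
  | cons e rest ih =>
    refine le_trans ?_ (ih _)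
    dsimp only
    split_ifs <;> omega

theorem pv_M_mem_le (code : List (String × Int × Int)) (c : Int) (m0 : Int)
    (e : String × Int × Int) (he : e ∈ code) (hc : e.2.1 = c) :
    e.2.2 ≤ code.foldl (fun m e => if e.2.1 = c then (if m < e.2.2 then e.2.2 else m) else m) m0 := by
  induction code generalizing m0 with
  | nil => cases he
  | cons f rest ih =>
    rcases List.mem_cons.1 he with h | h
    · subst h
      refine le_trans ?_ (pv_M_init_le rest c _)
      dsimp only [List.foldl_cons]
      rw [if_pos hc]
      split_ifs <;> omega
    · exact ih _ h

def pvM (code : List (String × Int × Int)) (tp : Int) : Int :=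
  code.foldl (fun m e => if e.2.1 = tp then (if m < e.2.2 then e.2.2 else m) else m) 0

theorem pv_maxD_eq_M (code : List (String × Int × Int)) (tp : Int)
    (h : ∀ e ∈ code, 0 ≤ e.2.2) :
    PySem.List.maxD ((code.filter (fun e => e.2.1 == tp)).map (fun e => e.2.2))
        (fun x => x) 0 = pvM code tp := by
  have hM : pvM code tp
      = ((code.filter (fun e => e.2.1 == tp)).map (fun e => e.2.2)).foldl max 0 := by
    rw [List.foldl_map, List.foldl_filter, pvM]
    have h : ∀ (m : Int) (e : String × Int × Int),
        (if e.2.1 = tp then (if m < e.2.2 then e.2.2 else m) else m)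
        = (if (e.2.1 == tp) = true then max m e.2.2 else m) := by
      intro m e; by_cases h1 : e.2.1 = tp <;> by_cases h2 : m < e.2.2 <;>
        simp [h1, h2, max_def] <;> omega
    simp only [h]
  set L := (code.filter (fun e => e.2.1 == tp)).map (fun e => e.2.2) with hL
  have hnn : ∀ z ∈ L, 0 ≤ z := by
    intro z hz
    rw [hL] at hz
    rcases List.mem_map.1 hz with ⟨e, he, rfl⟩
    exact h e (List.mem_filter.1 he).1
  rw [hM]
  rcases L with _ | ⟨y, t⟩
  · rfl
  · have hy0 : 0 ≤ y := hnn y (List.mem_cons_self ..)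
    have : PySem.List.maxD (y :: t) (fun x => x) 0 = t.foldl max y := by
      rw [PySem.List.maxD, PySem.List.max?_id_cons]; rfl
    rw [this]
    simp only [List.foldl_cons]
    rw [max_eq_right hy0]

def pvBucket (code : List (String × Int × Int)) (tp sp : Int) : List String :=
  (((code.filter (fun e => e.2.1 == tp)).filter (fun e => e.2.2 == sp)).map (fun e => e.1))

def pvCanon (code : List (String × Int × Int)) : List (Int × List (Int × List String)) :=
  (PySem.List.pyRange 0 ((PySem.Set.ofList (code.map (fun x => x.2.1))).length : Int)).map
    (fun tp => (tp, (PySem.List.pyRange 0 (pvM code tp + 1)).map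
      (fun sp => (sp, pvBucket code tp sp))))

theorem pv_getD_foldl_modify_key {ν β : Type} (l : List β) (key : β → Int)
    (f : ν → β → ν) (d0 : ν) (t : PySem.Dict Int ν) (c : Int) :
    (l.foldl (fun t e => t.modify (key e) d0 (fun v => f v e)) t).getD c d0
      = (l.filter (fun e => key e == c)).foldl f (t.getD c d0) := by
  induction l generalizing t with
  | nil => rfl
  | cons e rest ih =>
    simp only [List.foldl_cons, List.filter_cons]
    by_cases h : key e = c
    · subst h; simp [ih]
    · simp [ih, PySem.Dict.getD_modify, h, beq_iff_eq, Ne.symm h]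

theorem pv_getD_foldl_insert_key {ν β : Type} (l : List β) (key : β → Int)
    (f : ν → β → ν) (d0 : ν) (t : PySem.Dict Int ν) (c : Int) :
    (l.foldl (fun t e => t.insert (key e) (f (t.getD (key e) d0) e)) t).getD c d0
      = (l.filter (fun e => key e == c)).foldl f (t.getD c d0) := by
  induction l generalizing t with
  | nil => rfl
  | cons e rest ih =>
    simp only [List.foldl_cons, List.filter_cons]
    by_cases h : key e = c
    · subst h; simp [ih]
    · simp [ih, PySem.Dict.getD_insert, h, beq_iff_eq, Ne.symm h]

theorem pv_B_eq_canon (code : List (String × Int × Int))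
    (h : ∀ e ∈ code, 0 ≤ e.2.2) :
    decodeCode_alt code = pvCanon code := by
  simp only [decodeCode_alt, pvCanon]
  set byTp := code.foldl (fun g e =>
      g.insert e.2.1 (g.getD e.2.1 [] ++ [(e.2.2, e.1)])) PySem.Dict.empty
      with hbt
  have hkeys : byTp.keys = PySem.Set.ofList (code.map (fun x => x.2.1)) := by
    rw [hbt, PySem.Dict.keys_foldl_insert_key code (fun e => e.2.1)
      (fun (g : PySem.Dict Int (List (Int × String))) e => g.getD e.2.1 [] ++ [(e.2.2, e.1)])]
    simp [PySem.Set.update_nil_left]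
  have hsize : (byTp.size : Int) = ((PySem.Set.ofList (code.map (fun x => x.2.1))).length : Int) := by
    have : byTp.size = byTp.keys.length := by simp [PySem.Dict.keys, PySem.Dict.size]
    rw [this, hkeys]
  have hrows : ∀ tp : Int, byTp.getD tp []
      = (code.filter (fun e => e.2.1 == tp)).map (fun e => (e.2.2, e.1)) := by
    intro tp
    have h2 := pv_getD_foldl_insert_key code (fun e : String × Int × Int => e.2.1)
      (fun (v : List (Int × String)) e => v ++ [(e.2.2, e.1)]) ([] : List (Int × String))
      PySem.Dict.empty tp
    simp only [PySem.Dict.getD_empty] at h2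
    rw [hbt, h2, PySem.List.foldl_append_singleton_eq_map]
    simp
  rw [hsize]
  refine List.map_congr_left ?_
  intro tp _
  have hmap1 : ((code.filter (fun e => e.2.1 == tp)).map
        (fun e => (e.2.2, e.1))).map (fun r : Int × String => r.1)
      = (code.filter (fun e => e.2.1 == tp)).map (fun e => e.2.2) := by
    rw [List.map_map]; rfl
  rw [hrows tp, hmap1, pv_maxD_eq_M code tp h]
  refine congrArg _ (List.map_congr_left ?_)
  intro sp _
  refine congrArg _ ?_
  rw [List.filter_map, List.map_map]
  rfl

theorem pv_A_eq_canon (code : List (String × Int × Int))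
    (hP : Pre_decodeCode code) :
    decodeCode code = pvCanon code := by
  have h := hP
  unfold Pre_decodeCode at h
  simp only [decodeCode]
  set K : Int := ((PySem.Set.ofList (code.map (fun x => x.2.1))).length : Int) with hKdef
  set spMax := code.foldl (fun d e =>
      let d1 := if d.contains e.2.1 then d else d.insert e.2.1 0
      if e.2.2 > d1.getD e.2.1 0 then d1.insert e.2.1 e.2.2 else d1) PySem.Dict.empty with hsm
  have hMget : ∀ c : Int, spMax.getD c 0 = pvM code c := by
    intro c
    rw [hsm, pv_spMax_getD]
    rfl
  have hMkeys : spMax.keys = PySem.Set.ofList (code.map (fun x => x.2.1)) := by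
    rw [hsm, pv_spMax_keys]
    simp [PySem.Set.update_nil_left]
  have hKsz : (spMax.size : Int) = K := by
    have : spMax.size = spMax.keys.length := by simp [PySem.Dict.keys, PySem.Dict.size]
    rw [this, hMkeys, hKdef]
  rw [hKsz]
  set space0 := (PySem.List.pyRange 0 K).foldl (fun t tp =>
      t.insert tp ((PySem.List.pyRange 0 (spMax.getD tp 0 + 1)).foldl
        (fun (inner : PySem.Dict Int (List String)) sp => inner.insert sp []) PySem.Dict.empty)) PySem.Dict.empty with hs0
  have hits0 : space0.items = (PySem.List.pyRange 0 K).map (fun tp =>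
      (tp, (PySem.List.pyRange 0 (spMax.getD tp 0 + 1)).foldl
        (fun (inner : PySem.Dict Int (List String)) sp => inner.insert sp []) PySem.Dict.empty)) := by
    rw [hs0]
    have h4 := PySem.Dict.items_foldl_insert_fresh (PySem.List.pyRange 0 K)
      (fun tp : Int => tp)
      (fun tp => (PySem.List.pyRange 0 (spMax.getD tp 0 + 1)).foldl
        (fun (inner : PySem.Dict Int (List String)) sp => inner.insert sp []) PySem.Dict.empty)
      PySem.Dict.empty
      (fun a _ => PySem.Dict.contains_empty a)
      (by simpa using PySem.List.nodup_pyRange_one 0 K)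
    simpa using h4
  have hkeys0 : space0.keys = PySem.List.pyRange 0 K := by
    simp [PySem.Dict.keys, hits0, List.map_map, Function.comp_def]
  have hnd0 : space0.keys.Nodup := by
    rw [hkeys0]; exact PySem.List.nodup_pyRange_one 0 K
  have hg0 : ∀ tp ∈ PySem.List.pyRange 0 K, space0.getD tp PySem.Dict.empty
      = (PySem.List.pyRange 0 (spMax.getD tp 0 + 1)).foldl
        (fun (inner : PySem.Dict Int (List String)) sp => inner.insert sp []) PySem.Dict.empty := by
    intro tp htp
    refine PySem.Dict.getD_of_mem_items _ ?_ hnd0 _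
    rw [hits0]
    exact List.mem_map_of_mem htp
  -- inner pre-filled dict facts
  have hiit : ∀ tp : Int, ((PySem.List.pyRange 0 (spMax.getD tp 0 + 1)).foldl
      (fun (inner : PySem.Dict Int (List String)) sp => inner.insert sp []) PySem.Dict.empty).items
      = (PySem.List.pyRange 0 (spMax.getD tp 0 + 1)).map (fun sp => (sp, ([] : List String))) := by
    intro tp
    have h4 := PySem.Dict.items_foldl_insert_fresh (PySem.List.pyRange 0 (spMax.getD tp 0 + 1))
      (fun sp : Int => sp) (fun _ => ([] : List String)) PySem.Dict.empty
      (fun a _ => PySem.Dict.contains_empty a)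
      (by simpa using PySem.List.nodup_pyRange_one 0 (spMax.getD tp 0 + 1))
    simpa using h4
  have hiik : ∀ tp : Int, ((PySem.List.pyRange 0 (spMax.getD tp 0 + 1)).foldl
      (fun (inner : PySem.Dict Int (List String)) sp => inner.insert sp []) PySem.Dict.empty).keys
      = PySem.List.pyRange 0 (spMax.getD tp 0 + 1) := by
    intro tp
    simp [PySem.Dict.keys, hiit tp, List.map_map, Function.comp_def]
  have hiig : ∀ tp sp : Int, ((PySem.List.pyRange 0 (spMax.getD tp 0 + 1)).foldl
      (fun (inner : PySem.Dict Int (List String)) sp => inner.insert sp []) PySem.Dict.empty).getD sp [] = [] := by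
    intro tp sp
    by_cases hmem : sp ∈ PySem.List.pyRange 0 (spMax.getD tp 0 + 1)
    · refine PySem.Dict.getD_of_mem_items _ ?_ ?_ _
      · rw [hiit tp]; exact List.mem_map_of_mem hmem
      · rw [hiik tp]; exact PySem.List.nodup_pyRange_one _ _
    · refine PySem.Dict.getD_of_not_contains _ _ ?_
      rw [PySem.Dict.contains_eq_decide_mem_keys, hiik tp]
      simpa using hmem
  -- third pass
  set space1 := code.foldl (fun t e =>
      t.modify e.2.1 PySem.Dict.empty
        (fun inner => inner.modify e.2.2 [] (fun l => l ++ [e.1]))) space0 with hs1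
  have hk1 : space1.keys = PySem.List.pyRange 0 K := by
    rw [hs1]
    have h5 := PySem.Dict.keys_foldl_modify_key code (fun e : String × Int × Int => e.2.1)
      PySem.Dict.empty
      (fun (_ : PySem.Dict Int (PySem.Dict Int (List String))) (e : String × Int × Int)
        (inner : PySem.Dict Int (List String)) =>
        inner.modify e.2.2 [] (fun l => l ++ [e.1]))
      space0
    simp only [] at h5
    rw [h5, hkeys0, PySem.Set.update_eq_append_filter]
    have hnil : (PySem.Set.ofList (code.map (fun e : String × Int × Int => e.2.1))).filter
        (fun y => !(PySem.Set.contains (PySem.List.pyRange 0 K) y)) = [] := by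
      rw [List.filter_eq_nil_iff]
      intro y hy
      have hy2 : y ∈ code.map (fun e : String × Int × Int => e.2.1) :=
        (PySem.Set.mem_ofList _ _).1 hy
      rcases List.mem_map.1 hy2 with ⟨e, he, rfl⟩
      obtain ⟨-, h1, h2⟩ := h e he
      have hmem : e.2.1 ∈ PySem.List.pyRange 0 K :=
        PySem.List.mem_pyRange_one.2 ⟨h1, h2⟩
      simp
      exact ⟨h1, h2⟩
    rw [hnil, List.append_nil]
  have hnd1 : space1.keys.Nodup := by
    rw [hk1]; exact PySem.List.nodup_pyRange_one 0 K
  have hg1 : ∀ tp : Int, space1.getD tp PySem.Dict.empty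
      = (code.filter (fun e => e.2.1 == tp)).foldl
          (fun inner e => inner.modify e.2.2 [] (fun l => l ++ [e.1]))
          (space0.getD tp PySem.Dict.empty) := by
    intro tp
    rw [hs1]
    have h6 := pv_getD_foldl_modify_key code (fun e : String × Int × Int => e.2.1)
      (fun (inner : PySem.Dict Int (List String)) (e : String × Int × Int) =>
        inner.modify e.2.2 [] (fun l => l ++ [e.1]))
      PySem.Dict.empty space0 tp
    simpa using h6
  -- finish: compare item lists
  have hfin : space1.items.map (fun p => (p.1, p.2.items)) = pvCanon code := by
    rw [PySem.Dict.items_eq_map_keys space1 hnd1 PySem.Dict.empty, hk1, List.map_map]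
    rw [pvCanon, ← hKdef]
    refine List.map_congr_left ?_
    intro tp htp
    simp only [Function.comp_apply]
    -- the inner dict at tp
    have hmle : ∀ e ∈ code.filter (fun e => e.2.1 == tp), 0 ≤ e.2.2 ∧ e.2.2 ≤ pvM code tp := by
      intro e he
      rcases List.mem_filter.1 he with ⟨he1, he2⟩
      exact ⟨(h e he1).1, pv_M_mem_le code tp 0 e he1 (by simpa using he2)⟩
    have hIF : space1.getD tp PySem.Dict.empty
        = (code.filter (fun e => e.2.1 == tp)).foldl
            (fun inner e => inner.modify e.2.2 [] (fun l => l ++ [e.1]))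
            ((PySem.List.pyRange 0 (spMax.getD tp 0 + 1)).foldl
              (fun (inner : PySem.Dict Int (List String)) sp => inner.insert sp []) PySem.Dict.empty) := by
      rw [hg1 tp, hg0 tp htp]
    have hIFkeys : (space1.getD tp PySem.Dict.empty).keys
        = PySem.List.pyRange 0 (pvM code tp + 1) := by
      rw [hIF]
      have h7 := PySem.Dict.keys_foldl_modify_key (code.filter (fun e => e.2.1 == tp))
        (fun e : String × Int × Int => e.2.2) ([] : List String)
        (fun (_ : PySem.Dict Int (List String)) (e : String × Int × Int) (l : List String) =>
          l ++ [e.1])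
        ((PySem.List.pyRange 0 (spMax.getD tp 0 + 1)).foldl
          (fun (inner : PySem.Dict Int (List String)) sp => inner.insert sp []) PySem.Dict.empty)
      simp only [] at h7
      rw [h7, hiik tp, PySem.Set.update_eq_append_filter]
      have hnil : (PySem.Set.ofList ((code.filter (fun e => e.2.1 == tp)).map
            (fun e : String × Int × Int => e.2.2))).filter
          (fun y => !(PySem.Set.contains (PySem.List.pyRange 0 (spMax.getD tp 0 + 1)) y)) = [] := by
        rw [List.filter_eq_nil_iff]
        intro y hy
        rcases List.mem_map.1 ((PySem.Set.mem_ofList _ _).1 hy) with ⟨e, he, rfl⟩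
        obtain ⟨h1, h2⟩ := hmle e he
        have hmem : e.2.2 ∈ PySem.List.pyRange 0 (spMax.getD tp 0 + 1) :=
          PySem.List.mem_pyRange_one.2 ⟨h1, by rw [hMget tp]; omega⟩
        have := PySem.List.mem_pyRange_one.1 hmem
        simp
        omega
      rw [hnil, List.append_nil, hMget tp]
    have hIFnd : (space1.getD tp PySem.Dict.empty).keys.Nodup := by
      rw [hIFkeys]; exact PySem.List.nodup_pyRange_one _ _
    have hIFg : ∀ sp : Int, (space1.getD tp PySem.Dict.empty).getD sp [] = pvBucket code tp sp := by
      intro sp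
      rw [hIF]
      have h8 := pv_getD_foldl_modify_key (code.filter (fun e => e.2.1 == tp))
        (fun e : String × Int × Int => e.2.2)
        (fun (l : List String) (e : String × Int × Int) => l ++ [e.1])
        ([] : List String)
        ((PySem.List.pyRange 0 (spMax.getD tp 0 + 1)).foldl
          (fun (inner : PySem.Dict Int (List String)) sp => inner.insert sp []) PySem.Dict.empty)
        sp
      simp only [] at h8
      rw [h8, hiig tp sp, PySem.List.foldl_append_singleton_eq_map]
      simp [pvBucket]
    have hIFitems : (space1.getD tp PySem.Dict.empty).items
        = (PySem.List.pyRange 0 (pvM code tp + 1)).map (fun sp => (sp, pvBucket code tp sp)) := by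
      rw [PySem.Dict.items_eq_map_keys _ hIFnd ([] : List String), hIFkeys]
      refine List.map_congr_left ?_
      intro sp _
      rw [hIFg sp]
    rw [hIFitems]
  exact hfin

-- ===== VERDICT (by name: the statement is the Claim_ definition above) =====
theorem decodeCode_spec : Claim_equal_decodeCode := by
  intro code _ hpre
  unfold Spec_decodeCode
  rw [pv_A_eq_canon code hpre, pv_B_eq_canon code (fun e he => (hpre e he).1)]
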